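-- pv_equiv track=rewrite | github.com/StarsExpress/LeetCode-Repository | prefix_sum/partitions_count.py | count_max_partitions
-- ===== SOURCE A (Python) =====
-- def _binary_search(target: int, sorted_indices: list[int], size: int) -> int:
--     if size == 0:
--         return 0
--
--     back_idx, front_idx = 0, size - 1
--     while back_idx <= front_idx:
--         mid_idx = (back_idx + front_idx) // 2
--         if sorted_indices[mid_idx] < target:
--             back_idx = mid_idx + 1
--             continue
--         front_idx = mid_idx - 1
--
--     return back_idx  # Number of indices < target.
--
-- def count_max_partitions(numbers: list[int], k: int) -> int:  # LeetCode Q.2025.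
--     original_sum, max_partition_ways = sum(numbers), 0
--     prefix_sums2indices, prefix_sum = dict(), 0
--
--     # Can't partition at the last num (doesn't have a right neighbor).
--     for idx, num in enumerate(numbers[:-1]):
--         prefix_sum += num
--         if prefix_sum not in prefix_sums2indices.keys():
--             prefix_sums2indices.update({prefix_sum: []})
--         prefix_sums2indices[prefix_sum].append(idx)
--
--         if 2 * prefix_sum == original_sum:  # Base case: all numbers unchanged.
--             max_partition_ways += 1
--
--     for idx, num in enumerate(numbers):
--         new_sum = original_sum + k - num
--         if new_sum % 2 == 0:  # Only "even" new sum can work!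
--             right_side_count = 0
--             right_side_prefix_sum = new_sum // 2 + num - k
--
--             if right_side_prefix_sum in prefix_sums2indices.keys():
--                 indices = prefix_sums2indices[right_side_prefix_sum]
--                 total_count = len(indices)
--                 smaller_count = _binary_search(idx, indices, total_count)
--                 right_side_count += total_count - smaller_count
--
--             left_side_count = 0
--             left_side_prefix_sum = new_sum // 2
--
--             if left_side_prefix_sum in prefix_sums2indices.keys():
--                 indices = prefix_sums2indices[left_side_prefix_sum]
--                 left_side_count += _binary_search(idx, indices, len(indices))
--
--             if left_side_count + right_side_count > max_partition_ways:
--                 max_partition_ways = left_side_count + right_side_count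
--
--     return max_partition_ways
-- ===== SOURCE B (Python) =====
-- def count_max_partitions(numbers: list[int], k: int) -> int:  # LeetCode Q.2025.
--     # Two prefix-sum -> count maps (left of the scan point / at-or-right of it),
--     # moved across in a single pass, instead of per-value sorted index lists + binary search.
--     n = len(numbers)
--     total = sum(numbers)
--     right = {}
--     prefix = 0
--     for x in numbers[:-1]:
--         prefix += x
--         right[prefix] = right.get(prefix, 0) + 1
--
--     best = right.get(total // 2, 0) if total % 2 == 0 else 0
--     left = {}
--     prefix = 0
--     for i, x in enumerate(numbers):
--         new_sum = total + k - x
--         if new_sum % 2 == 0: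
--             half = new_sum // 2
--             ways = left.get(half, 0) + right.get(half + x - k, 0)
--             if ways > best:
--                 best = ways
--         prefix += x
--         if i < n - 1:
--             left[prefix] = left.get(prefix, 0) + 1
--             right[prefix] -= 1
--     return best
-- ===== Notes on version B (the rewrite author's own statement) =====
-- stated objective: alternative
-- what changed: Replaces the dict of per-prefix-sum sorted index lists plus a hand-written binary search per element by two prefix-sum->count hashmaps (counts left of / at-or-right of the scan point) moved across the array in a single pass.
import Mathlib
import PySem

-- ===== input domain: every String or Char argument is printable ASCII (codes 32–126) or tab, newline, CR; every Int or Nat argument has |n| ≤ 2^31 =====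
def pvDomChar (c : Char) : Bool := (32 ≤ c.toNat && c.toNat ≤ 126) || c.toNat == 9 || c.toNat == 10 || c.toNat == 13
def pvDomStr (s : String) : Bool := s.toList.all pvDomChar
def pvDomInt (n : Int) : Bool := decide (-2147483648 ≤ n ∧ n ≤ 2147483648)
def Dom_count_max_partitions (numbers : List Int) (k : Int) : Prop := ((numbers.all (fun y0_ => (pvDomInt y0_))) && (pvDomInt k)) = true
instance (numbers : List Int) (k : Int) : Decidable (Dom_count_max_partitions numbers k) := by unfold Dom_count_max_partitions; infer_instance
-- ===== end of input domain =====

-- B replaces A's dict of sorted index lists + per-element binary search by two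
-- prefix-sum->count maps moved across the array in one pass (objective: alternative algorithm).


-- ===== PORT A =====
-- _binary_search's while loop (state back_idx/front_idx); xs[mid] is in range whenever reached,
-- so the pyGetD default is never used.
def pvBsearchLoop (target : Int) (xs : List Int) (back front : Int) : Int :=
  if h : back ≤ front then
    let mid := PySem.Int.floordiv (back + front) 2
    if PySem.List.pyGetD xs mid 0 < target then
      pvBsearchLoop target xs (mid + 1) front
    else
      pvBsearchLoop target xs back (mid - 1)
  else back
termination_by (front + 1 - back).toNat
decreasing_by
  · have hb := PySem.Int.floordiv_two_mid_bounds h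
    omega
  · have hb := PySem.Int.floordiv_two_mid_bounds h
    omega

def pv_binary_search (target : Int) (sorted_indices : List Int) (size : Int) : Int :=
  if size = 0 then 0
  else pvBsearchLoop target sorted_indices 0 (size - 1)

-- body of A's first loop (state: dict, prefix_sum, max_partition_ways)
def pvAStep1 (original_sum : Int) (st : PySem.Dict Int (List Int) × Int × Int)
    (p : Int × Int) : PySem.Dict Int (List Int) × Int × Int :=
  let prefix_sum := st.2.1 + p.2
  let d := if st.1.contains prefix_sum then st.1 else st.1.insert prefix_sum []
  let d := d.modify prefix_sum [] (fun l => l ++ [p.1])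
  let ways := if 2 * prefix_sum = original_sum then st.2.2 + 1 else st.2.2
  (d, prefix_sum, ways)

-- body of A's second loop (state: max_partition_ways)
def pvAStep2 (original_sum k : Int) (d : PySem.Dict Int (List Int)) (mx : Int) (p : Int × Int) : Int :=
  let new_sum := original_sum + k - p.2
  if PySem.Int.mod new_sum 2 = 0 then
    let right_side_prefix_sum := PySem.Int.floordiv new_sum 2 + p.2 - k
    let right_side_count :=
      if d.contains right_side_prefix_sum then
        let indices := d.getD right_side_prefix_sum []
        let total_count := PySem.List.len indices
        (0 : Int) + (total_count - pv_binary_search p.1 indices total_count)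
      else 0
    let left_side_count :=
      if d.contains (PySem.Int.floordiv new_sum 2) then
        let indices := d.getD (PySem.Int.floordiv new_sum 2) []
        (0 : Int) + pv_binary_search p.1 indices (PySem.List.len indices)
      else 0
    if left_side_count + right_side_count > mx then left_side_count + right_side_count else mx
  else mx

def count_max_partitions (numbers : List Int) (k : Int) : Int :=
  let original_sum := numbers.sum
  let st := (PySem.List.enumerate (PySem.List.slice numbers none (some (-1))) 0).foldl
    (pvAStep1 original_sum) (PySem.Dict.empty, 0, 0)
  (PySem.List.enumerate numbers 0).foldl (pvAStep2 original_sum k st.1) st.2.2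

-- ===== PORT B =====
-- body of B's first loop (state: right counter, prefix)
def pvBStep1 (st : PySem.Dict Int Int × Int) (x : Int) : PySem.Dict Int Int × Int :=
  let pfx := st.2 + x
  (st.1.insert pfx (st.1.getD pfx 0 + 1), pfx)

-- body of B's second loop (state: best, left, right, prefix)
def pvBStep2 (total k n : Int) (st : Int × PySem.Dict Int Int × PySem.Dict Int Int × Int)
    (p : Int × Int) : Int × PySem.Dict Int Int × PySem.Dict Int Int × Int :=
  let new_sum := total + k - p.2
  let best :=
    if PySem.Int.mod new_sum 2 = 0 then
      let half := PySem.Int.floordiv new_sum 2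
      let ways := st.2.1.getD half 0 + st.2.2.1.getD (half + p.2 - k) 0
      if ways > st.1 then ways else st.1
    else st.1
  let pfx := st.2.2.2 + p.2
  if p.1 < n - 1 then
    (best, st.2.1.insert pfx (st.2.1.getD pfx 0 + 1), st.2.2.1.modify pfx 0 (fun c => c - 1), pfx)
  else
    (best, st.2.1, st.2.2.1, pfx)

def count_max_partitions_alt (numbers : List Int) (k : Int) : Int :=
  let n := PySem.List.len numbers
  let total := numbers.sum
  let r0 := (PySem.List.slice numbers none (some (-1))).foldl pvBStep1 (PySem.Dict.empty, 0)
  let best0 := if PySem.Int.mod total 2 = 0 then r0.1.getD (PySem.Int.floordiv total 2) 0 else 0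
  ((PySem.List.enumerate numbers 0).foldl (pvBStep2 total k n) (best0, PySem.Dict.empty, r0.1, 0)).1

-- ===== PRECONDITION & SPEC =====
def Spec_count_max_partitions (numbers : List Int) (k : Int) (out : Int) : Prop := out = count_max_partitions_alt numbers k
instance (numbers : List Int) (k : Int) (out : Int) : Decidable (Spec_count_max_partitions numbers k out) := by unfold Spec_count_max_partitions; infer_instance

-- ===== CLAIM (what is proved, stated in full; the proofs are below) =====
def Claim_equal_count_max_partitions : Prop := ∀ (numbers : List Int) (k : Int), Dom_count_max_partitions numbers k → Spec_count_max_partitions numbers k (count_max_partitions numbers k)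

-- ===== LEMMAS AND PROOFS =====

-- prefix sum through index j (inclusive) of l
def pvP (l : List Int) (j : Nat) : Int := (l.take (j + 1)).sum
-- indices j (over the cut list l = numbers[:-1]) with prefix sum s, in increasing order
def pvIL (l : List Int) (s : Int) : List Nat :=
  (List.range l.length).filter (fun j => decide (pvP l j = s))
-- how many such indices are < i / ≥ i
def pvCntL (l : List Int) (i : Nat) (s : Int) : Nat := (pvIL l s).countP (fun j => decide (j < i))
def pvCntR (l : List Int) (i : Nat) (s : Int) : Nat := (pvIL l s).countP (fun j => decide (i ≤ j))

def pvBase (numbers : List Int) : Int :=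
  ((List.range numbers.dropLast.length).countP
    (fun j => decide (2 * pvP numbers.dropLast j = numbers.sum)) : Int)

def pvSpecStep (numbers : List Int) (k : Int) (acc : Int) (i : Nat) : Int :=
  let x := numbers.getD i 0
  let ns := numbers.sum + k - x
  if PySem.Int.mod ns 2 = 0 then
    let w := (pvCntL numbers.dropLast i (PySem.Int.floordiv ns 2) : Int)
           + (pvCntR numbers.dropLast i (PySem.Int.floordiv ns 2 + x - k) : Int)
    if w > acc then w else acc
  else acc

def pvSpecRun (numbers : List Int) (k : Int) : Int :=
  (List.range numbers.length).foldl (pvSpecStep numbers k) (pvBase numbers)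

-- basic facts about pvP / pvIL
lemma pvP_append (l : List Int) (x : Int) (j : Nat) (hj : j < l.length) :
    pvP (l ++ [x]) j = pvP l j := by
  unfold pvP
  rw [List.take_append_of_le_length (by omega)]

lemma pvP_append_last (l : List Int) (x : Int) : pvP (l ++ [x]) l.length = l.sum + x := by
  unfold pvP
  rw [List.take_of_length_le (by simp), List.sum_append]
  simp

lemma pvIL_append (l : List Int) (x : Int) (s : Int) :
    pvIL (l ++ [x]) s = pvIL l s ++ (if l.sum + x = s then [l.length] else []) := by
  unfold pvIL
  rw [List.length_append, List.length_singleton, List.range_succ, List.filter_append]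
  congr 1
  · apply List.filter_congr
    intro j hj
    rw [List.mem_range] at hj
    simp [pvP_append l x j hj]
  · rw [List.filter_singleton]
    simp [pvP_append_last]

lemma pvIL_sorted (l : List Int) (s : Int) : (pvIL l s).Pairwise (· < ·) := by
  exact (List.pairwise_lt_range).filter _

-- countP characterisation used by the binary-search spec
lemma pv_countP_threshold (xs : List Int) (p : Int → Bool) (r : Nat) (hr : r ≤ xs.length)
    (h1 : ∀ i (h : i < xs.length), i < r → p xs[i])
    (h2 : ∀ i (h : i < xs.length), r ≤ i → ¬ p xs[i]) :
    xs.countP p = r := by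
  conv_lhs => rw [← List.take_append_drop r xs]
  rw [List.countP_append]
  have ht : (xs.take r).countP p = r := by
    rw [List.countP_eq_length.2, List.length_take]
    · omega
    · intro a ha
      rw [List.mem_iff_getElem] at ha
      obtain ⟨i, hi, rfl⟩ := ha
      rw [List.getElem_take]
      exact h1 i (by simp at hi; omega) (by simp at hi; omega)
  have hd : (xs.drop r).countP p = 0 := by
    rw [List.countP_eq_zero]
    intro a ha
    rw [List.mem_iff_getElem] at ha
    obtain ⟨i, hi, rfl⟩ := ha
    rw [List.getElem_drop]
    exact fun hp => h2 (r + i) (by simp at hi; omega) (by omega) hp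
  omega

lemma pvBsearchLoop_spec (t : Int) (xs : List Int)
    (hs : ∀ i j (hi : i < xs.length) (hj : j < xs.length), i ≤ j → xs[i] ≤ xs[j]) :
    ∀ (N : Nat) (back front : Int), (front + 1 - back).toNat ≤ N →
    0 ≤ back → front < (xs.length : Int) → back ≤ front + 1 →
    (∀ i (h : i < xs.length), (i : Int) < back → xs[i] < t) →
    (∀ i (h : i < xs.length), front < (i : Int) → ¬ (xs[i] < t)) →
    pvBsearchLoop t xs back front = (xs.countP (fun v => decide (v < t)) : Int) := by
  have final : ∀ back front : Int, 0 ≤ back → front < (xs.length : Int) → back ≤ front + 1 →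
      (∀ i (h : i < xs.length), (i : Int) < back → xs[i] < t) →
      (∀ i (h : i < xs.length), front < (i : Int) → ¬ (xs[i] < t)) →
      ¬ back ≤ front →
      back = (xs.countP (fun v => decide (v < t)) : Int) := by
    intro back front h0 hlen hble h1 h2 hbf
    have hcnt : xs.countP (fun v => decide (v < t)) = back.toNat := by
      apply pv_countP_threshold xs _ back.toNat (by omega)
      · intro i hi hilt
        simpa using h1 i hi (by omega)
      · intro i hi hile
        simpa using h2 i hi (by omega)
    rw [hcnt]
    omega
  intro N
  induction N with
  | zero =>
    intro back front hfuel h0 hlen hble h1 h2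
    have hbf : ¬ back ≤ front := by omega
    rw [pvBsearchLoop, dif_neg hbf]
    exact final back front h0 hlen hble h1 h2 hbf
  | succ N ih =>
    intro back front hfuel h0 hlen hble h1 h2
    by_cases hbf : back ≤ front
    · rw [pvBsearchLoop, dif_pos hbf]
      have hmid := PySem.Int.floordiv_two_mid_bounds hbf
      simp only []
      have hget : PySem.List.pyGetD xs (PySem.Int.floordiv (back + front) 2) 0
          = xs[(PySem.Int.floordiv (back + front) 2).toNat]'(by simp; omega) := by
        apply PySem.List.pyGetD_eq_getElem <;> simp <;> omega
      rw [hget]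
      set mid := PySem.Int.floordiv (back + front) 2 with hmiddef
      split_ifs with hlt
      · apply ih (mid + 1) front (by omega) (by omega) hlen (by omega)
        · intro i hi hilt
          calc xs[i] ≤ xs[mid.toNat]'(by omega) := by
                apply hs i mid.toNat hi (by omega) (by omega)
            _ < t := hlt
        · exact h2
      · apply ih back (mid - 1) (by omega) h0 (by omega) (by omega) h1
        intro i hi hile hcon
        apply hlt
        calc xs[mid.toNat]'(by omega) ≤ xs[i] := by
              apply hs mid.toNat i (by omega) hi (by omega)
          _ < t := hcon
    · rw [pvBsearchLoop, dif_neg hbf]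
      exact final back front h0 hlen hble h1 h2 hbf

lemma pv_binary_search_spec (t : Int) (xs : List Int) (hs : xs.Pairwise (· ≤ ·)) :
    pv_binary_search t xs (PySem.List.len xs) = (xs.countP (fun v => decide (v < t)) : Int) := by
  unfold pv_binary_search
  simp only [PySem.List.len_eq]
  have hs' : ∀ i j (hi : i < xs.length) (hj : j < xs.length), i ≤ j → xs[i] ≤ xs[j] := by
    intro i j hi hj hij
    rcases Nat.lt_or_eq_of_le hij with h | h
    · exact (List.pairwise_iff_getElem.1 hs) i j hi hj h
    · subst h; exact le_refl _
  split_ifs with h0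
  · have hnil : xs = [] := List.length_eq_zero_iff.1 (by exact_mod_cast h0)
    subst hnil; simp
  · have hpos : 0 < xs.length := by
      rcases Nat.eq_zero_or_pos xs.length with h | h
      · exact absurd (by exact_mod_cast congrArg (Int.ofNat) h) (by simpa using h0)
      · exact h
    apply pvBsearchLoop_spec t xs hs' xs.length 0 ((xs.length : Int) - 1)
    · omega
    · omega
    · exact_mod_cast (by omega : ((xs.length : Int) - 1) < (xs.length : Int))
    · omega
    · intro i hi hlt
      omega
    · intro i hi hgt
      omega

-- the two counts A extracts from its dict entry, in pvCntL/pvCntR form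
lemma pv_bsearch_cntL (l : List Int) (s : Int) (i : Nat) :
    pv_binary_search (i : Int) ((pvIL l s).map (fun (j : Nat) => (j : Int)))
      (PySem.List.len ((pvIL l s).map (fun (j : Nat) => (j : Int)))) = (pvCntL l i s : Int) := by
  have hsorted : ((pvIL l s).map (fun (j : Nat) => (j : Int))).Pairwise (· ≤ ·) := by
    rw [List.pairwise_map]
    refine (pvIL_sorted l s).imp ?_
    intro a b hab
    exact_mod_cast le_of_lt hab
  rw [pv_binary_search_spec _ _ hsorted]
  unfold pvCntL
  rw [List.countP_map]
  congr 1
  apply List.countP_congr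
  intro j hj
  simp [Function.comp]

lemma pv_cntR_eq (l : List Int) (s : Int) (i : Nat) :
    ((pvIL l s).length : Int) - (pvCntL l i s : Int) = (pvCntR l i s : Int) := by
  unfold pvCntL pvCntR
  have h := List.length_eq_countP_add_countP (l := pvIL l s) (fun j => decide (j < i))
  have hc : (pvIL l s).countP (fun j => decide ¬(decide (j < i)) = true)
      = (pvIL l s).countP (fun j => decide (i ≤ j)) := by
    apply List.countP_congr
    intro j hj
    simp only [decide_eq_true_eq, decide_not, Bool.not_eq_true', decide_eq_false_iff_not]
    omega
  omega

-- invariant of A's first loop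
lemma pvA1 (S : Int) (l : List Int) :
    (∀ s, ((PySem.List.enumerate l 0).foldl (pvAStep1 S) (PySem.Dict.empty, 0, 0)).1.getD s []
          = (pvIL l s).map (fun (j : Nat) => (j : Int)))
    ∧ (∀ s, ((PySem.List.enumerate l 0).foldl (pvAStep1 S) (PySem.Dict.empty, 0, 0)).1.contains s = true
          ↔ pvIL l s ≠ [])
    ∧ ((PySem.List.enumerate l 0).foldl (pvAStep1 S) (PySem.Dict.empty, 0, 0)).2.1 = l.sum
    ∧ ((PySem.List.enumerate l 0).foldl (pvAStep1 S) (PySem.Dict.empty, 0, 0)).2.2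
        = ((List.range l.length).countP (fun j => decide (2 * pvP l j = S)) : Int) := by
  induction l using List.reverseRecOn with
  | nil =>
    refine ⟨?_, ?_, ?_, ?_⟩ <;>
      simp [PySem.List.enumerate_nil, pvIL, PySem.Dict.getD_empty, PySem.Dict.contains_empty]
  | append_singleton l x ih =>
    obtain ⟨ihd, ihc, ihp, ihw⟩ := ih
    rw [PySem.List.enumerate_append, List.foldl_append, PySem.List.enumerate_cons,
      PySem.List.enumerate_nil, List.foldl_cons, List.foldl_nil]
    set st := (PySem.List.enumerate l 0).foldl (pvAStep1 S) (PySem.Dict.empty, 0, 0) with hst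
    unfold pvAStep1
    simp only []
    rw [ihp]
    set p : Int := l.sum + x with hp
    have hgd2 : ∀ s', (if st.1.contains p then st.1 else st.1.insert p []).getD s' []
        = st.1.getD s' [] := by
      intro s'
      by_cases hc : st.1.contains p
      · rw [if_pos hc]
      · rw [if_neg hc]
        by_cases hsp : s' = p
        · subst hsp
          rw [PySem.Dict.getD_insert_self, PySem.Dict.getD_of_not_contains st.1 []
            (by simpa using hc)]
        · exact PySem.Dict.getD_insert_of_ne st.1 _ _ hsp
    have hcd2 : ∀ s', (if st.1.contains p then st.1 else st.1.insert p []).contains s'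
        = (s' == p || st.1.contains s') := by
      intro s'
      by_cases hc : st.1.contains p
      · rw [if_pos hc]
        by_cases hsp : s' = p
        · subst hsp; simp [hc]
        · simp [hsp]
      · rw [if_neg hc, PySem.Dict.contains_insert]
    refine ⟨?_, ?_, ?_, ?_⟩
    · intro s'
      by_cases hsp : s' = p
      · subst hsp
        rw [PySem.Dict.getD_modify_self, hgd2, ihd, pvIL_append, if_pos rfl]
        simp
      · rw [PySem.Dict.getD_modify_of_ne _ _ _ hsp, hgd2, ihd, pvIL_append,
          if_neg (fun h => hsp (hp.trans h).symm)]
        simp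
    · intro s'
      rw [PySem.Dict.contains_modify, hcd2, pvIL_append]
      by_cases hsp : s' = p
      · subst hsp
        rw [if_pos hp.symm]
        simp
      · have hne : ¬ (l.sum + x = s') := fun h => hsp (hp.trans h).symm
        have hbe : (s' == p) = false := by simp [hsp]
        rw [if_neg hne, hbe]
        simp only [Bool.false_or, List.append_nil]
        exact ihc s'
    · rw [List.sum_append]; simp; exact hp
    · rw [ihw, List.length_append, List.length_singleton, List.range_succ,
        List.countP_append]
      have hcg : (List.range l.length).countP (fun j => decide (2 * pvP (l ++ [x]) j = S))
          = (List.range l.length).countP (fun j => decide (2 * pvP l j = S)) := by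
        apply List.countP_congr
        intro j hj
        rw [List.mem_range] at hj
        rw [pvP_append l x j hj]
      rw [hcg]
      simp only [List.countP_cons, List.countP_nil, pvP_append_last]
      by_cases h2 : 2 * (l.sum + x) = S
      · rw [if_pos h2]
        simp only [h2, decide_true, if_pos]
        push_cast
        ring
      · rw [if_neg h2]
        simp [h2]

-- invariant of B's first loop
lemma pvB1 (l : List Int) :
    (l.foldl pvBStep1 (PySem.Dict.empty, 0)).2 = l.sum
    ∧ ∀ s, (l.foldl pvBStep1 (PySem.Dict.empty, 0)).1.getD s 0 = ((pvIL l s).length : Int) := by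
  induction l using List.reverseRecOn with
  | nil => exact ⟨rfl, by intro s; simp [PySem.Dict.getD_empty, pvIL]⟩
  | append_singleton l x ih =>
    obtain ⟨ihp, ihd⟩ := ih
    rw [List.foldl_append, List.foldl_cons, List.foldl_nil]
    set st := l.foldl pvBStep1 (PySem.Dict.empty, 0) with hst
    unfold pvBStep1
    simp only []
    rw [ihp]
    constructor
    · rw [List.sum_append]; simp
    · intro s
      by_cases hsp : s = l.sum + x
      · subst hsp
        rw [PySem.Dict.getD_insert_self, ihd, pvIL_append, if_pos rfl]
        simp
      · rw [PySem.Dict.getD_insert_of_ne st.1 _ _ hsp, ihd, pvIL_append,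
          if_neg (fun h => hsp h.symm)]
        simp

-- count recurrences
lemma pv_countP_range_lt_succ (m i : Nat) (q : Nat → Bool) (h : i < m) :
    (List.range m).countP (fun j => decide (j < i + 1) && q j)
      = (List.range m).countP (fun j => decide (j < i) && q j) + (if q i then 1 else 0) := by
  induction m with
  | zero => omega
  | succ m ih =>
    rw [List.range_succ, List.countP_append, List.countP_append]
    by_cases him : i < m
    · rw [ih him]
      have he : (decide (m < i + 1)) = (decide (m < i)) := by
        simp only [decide_eq_decide]; omega
      simp only [List.countP_cons, List.countP_nil, he]
      omega
    · have him' : i = m := by omega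
      subst him'
      have hcg : (List.range i).countP (fun j => decide (j < i + 1) && q j)
          = (List.range i).countP (fun j => decide (j < i) && q j) := by
        apply List.countP_congr
        intro x hx
        rw [List.mem_range] at hx
        simp only [Bool.and_eq_true, decide_eq_true_eq]
        constructor <;> rintro ⟨h1, h2⟩ <;> exact ⟨by omega, h2⟩
      rw [hcg]
      simp only [List.countP_cons, List.countP_nil]
      by_cases hq : q i = true <;> simp [hq]

lemma pv_countP_range_ge_succ (m i : Nat) (q : Nat → Bool) (h : i < m) :
    (List.range m).countP (fun j => decide (i ≤ j) && q j)
      = (List.range m).countP (fun j => decide (i + 1 ≤ j) && q j) + (if q i then 1 else 0) := by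
  induction m with
  | zero => omega
  | succ m ih =>
    rw [List.range_succ, List.countP_append, List.countP_append]
    by_cases him : i < m
    · rw [ih him]
      have he : (decide (i ≤ m)) = (decide (i + 1 ≤ m)) := by
        simp only [decide_eq_decide]; omega
      simp only [List.countP_cons, List.countP_nil, he]
      omega
    · have him' : i = m := by omega
      subst him'
      have hcg : (List.range i).countP (fun j => decide (i ≤ j) && q j)
          = (List.range i).countP (fun j => decide (i + 1 ≤ j) && q j) := by
        apply List.countP_congr
        intro x hx
        rw [List.mem_range] at hx
        simp only [Bool.and_eq_true, decide_eq_true_eq]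
        constructor <;> rintro ⟨h1, h2⟩ <;> exact ⟨by omega, h2⟩
      rw [hcg]
      simp only [List.countP_cons, List.countP_nil]
      by_cases hq : q i = true <;> simp [hq]

lemma pvCntL_range (l : List Int) (i : Nat) (s : Int) :
    pvCntL l i s = (List.range l.length).countP (fun j => decide (j < i) && decide (pvP l j = s)) := by
  unfold pvCntL pvIL
  rw [List.countP_filter]

lemma pvCntR_range (l : List Int) (i : Nat) (s : Int) :
    pvCntR l i s = (List.range l.length).countP (fun j => decide (i ≤ j) && decide (pvP l j = s)) := by
  unfold pvCntR pvIL
  rw [List.countP_filter]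

lemma pvCntL_zero (l : List Int) (s : Int) : pvCntL l 0 s = 0 := by
  unfold pvCntL
  apply List.countP_eq_zero.2
  simp

lemma pvCntR_zero (l : List Int) (s : Int) : pvCntR l 0 s = (pvIL l s).length := by
  unfold pvCntR
  apply List.countP_eq_length.2
  simp

lemma pvCntL_succ (l : List Int) (i : Nat) (s : Int) (h : i < l.length) :
    pvCntL l (i + 1) s = pvCntL l i s + (if pvP l i = s then 1 else 0) := by
  rw [pvCntL_range, pvCntL_range, pv_countP_range_lt_succ _ _ _ h]
  simp

lemma pvCntR_succ (l : List Int) (i : Nat) (s : Int) (h : i < l.length) :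
    pvCntR l i s = pvCntR l (i + 1) s + (if pvP l i = s then 1 else 0) := by
  rw [pvCntR_range, pvCntR_range, pv_countP_range_ge_succ _ _ _ h]
  simp

-- pvBase in B's form
lemma pvBase_alt (numbers : List Int) :
    (if PySem.Int.mod numbers.sum 2 = 0
     then ((pvIL numbers.dropLast (PySem.Int.floordiv numbers.sum 2)).length : Int)
     else 0) = pvBase numbers := by
  by_cases he : PySem.Int.mod numbers.sum 2 = 0
  · rw [if_pos he]
    obtain ⟨q, hq⟩ := (PySem.Int.mod_eq_zero_iff_dvd _ _).1 he
    have hfd : PySem.Int.floordiv numbers.sum 2 = q := by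
      rw [PySem.Int.floordiv_eq_ediv_of_pos (by norm_num), hq]
      omega
    rw [hfd]
    unfold pvBase pvIL
    rw [List.countP_eq_length_filter]
    congr 2
    apply List.filter_congr
    intro j hj
    simp only [decide_eq_decide]
    omega
  · rw [if_neg he]
    unfold pvBase
    have h0 : (List.range numbers.dropLast.length).countP
        (fun j => decide (2 * pvP numbers.dropLast j = numbers.sum)) = 0 := by
      rw [List.countP_eq_zero]
      intro j _ hcon
      apply he
      rw [PySem.Int.mod_eq_zero_iff_dvd]
      exact ⟨pvP numbers.dropLast j, by simpa using (of_decide_eq_true hcon).symm⟩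
    rw [h0]
    rfl

-- A's second-loop body equals the spec step
lemma pvAStep2_eq (numbers : List Int) (k : Int) (d : PySem.Dict Int (List Int))
    (hd : ∀ s, d.getD s [] = (pvIL numbers.dropLast s).map (fun (j : Nat) => (j : Int)))
    (hc : ∀ s, d.contains s = true ↔ pvIL numbers.dropLast s ≠ [])
    (i : Nat) (mx : Int) :
    pvAStep2 numbers.sum k d mx ((i : Int), numbers.getD i 0) = pvSpecStep numbers k mx i := by
  unfold pvAStep2 pvSpecStep
  simp only []
  by_cases hm : PySem.Int.mod (numbers.sum + k - numbers.getD i 0) 2 = 0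
  · rw [if_pos hm, if_pos hm]
    have hcount : ∀ s : Int,
        (if d.contains s then
          (0 : Int) + pv_binary_search (i : Int) (d.getD s [])
            (PySem.List.len (d.getD s []))
         else 0) = (pvCntL numbers.dropLast i s : Int) := by
      intro s
      by_cases hcr : d.contains s
      · rw [if_pos hcr, hd s, pv_bsearch_cntL, zero_add]
      · rw [if_neg hcr]
        have hnil : pvIL numbers.dropLast s = [] := by
          by_contra hne
          exact hcr ((hc s).2 hne)
        unfold pvCntL
        rw [hnil]
        simp
    have hcountR : ∀ s : Int,
        (if d.contains s then
          (0 : Int) + (PySem.List.len (d.getD s [])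
            - pv_binary_search (i : Int) (d.getD s []) (PySem.List.len (d.getD s [])))
         else 0) = (pvCntR numbers.dropLast i s : Int) := by
      intro s
      by_cases hcr : d.contains s
      · rw [if_pos hcr, hd s, pv_bsearch_cntL, zero_add]
        simp only [PySem.List.len_eq, List.length_map]
        rw [pv_cntR_eq]
      · rw [if_neg hcr]
        have hnil : pvIL numbers.dropLast s = [] := by
          by_contra hne
          exact hcr ((hc s).2 hne)
        unfold pvCntR
        rw [hnil]
        simp
    rw [hcount, hcountR]
  · rw [if_neg hm, if_neg hm]

-- B's second loop computes the spec fold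
lemma pvB2 (numbers : List Int) (k : Int) :
    ∀ (rest : List Int) (i : Nat), numbers.drop i = rest →
    ∀ (best pre : Int) (left right : PySem.Dict Int Int),
    (∀ s, left.getD s 0 = (pvCntL numbers.dropLast i s : Int)) →
    (∀ s, right.getD s 0 = (pvCntR numbers.dropLast i s : Int)) →
    pre = (numbers.take i).sum →
    ((PySem.List.enumerate rest (i : Int)).foldl (pvBStep2 numbers.sum k (PySem.List.len numbers))
        (best, left, right, pre)).1
      = (List.range' i rest.length).foldl (pvSpecStep numbers k) best := by
  intro rest
  induction rest with
  | nil =>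
    intro i _ best pre left right _ _ _
    simp [PySem.List.enumerate_nil]
  | cons x rest' ih =>
    intro i hdrop best pre left right hL hR hpre
    have hlen : i < numbers.length := by
      by_contra hcon
      have : numbers.drop i = [] := List.drop_eq_nil_of_le (by omega)
      rw [hdrop] at this
      simp at this
    have hlen2 : numbers.length = i + 1 + rest'.length := by
      have := congrArg List.length hdrop
      rw [List.length_drop] at this
      simp at this
      omega
    have hxe : numbers[i]? = some x := by
      have h0 : (numbers.drop i)[0]? = numbers[i + 0]? := List.getElem?_drop
      rw [hdrop] at h0
      simpa using h0.symm
    have hx : numbers.getD i 0 = x := by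
      unfold List.getD
      rw [hxe]
      rfl
    have hdrop' : numbers.drop (i + 1) = rest' := by
      have : List.drop 1 (numbers.drop i) = numbers.drop (i + 1) := List.drop_drop
      rw [hdrop] at this
      simpa [Nat.add_comm] using this.symm
    rw [PySem.List.enumerate_cons, List.foldl_cons, List.length_cons, List.range'_succ,
      List.foldl_cons]
    have hway : (if PySem.Int.mod (numbers.sum + k - x) 2 = 0 then
          let half := PySem.Int.floordiv (numbers.sum + k - x) 2
          let ways := left.getD half 0 + right.getD (half + x - k) 0
          if ways > best then ways else best
        else best) = pvSpecStep numbers k best i := by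
      unfold pvSpecStep
      simp only [hx, hL, hR]
    have hcast : (i : Int) + 1 = ((i + 1 : Nat) : Int) := by push_cast; ring
    have hpre' : pre + x = (numbers.take (i + 1)).sum := by
      rw [List.take_add_one, hxe, List.sum_append, hpre]
      simp
    unfold pvBStep2
    simp only [PySem.List.len_eq]
    by_cases hni : ((i : Int) < (numbers.length : Int) - 1)
    · -- i is not the last index
      have hni' : i + 1 < numbers.length := by
        push_cast at hni
        omega
      rw [if_pos hni, hway, hcast]
      have hdL : i < numbers.dropLast.length := by
        rw [List.length_dropLast]
        omega
      have hpfx : pre + x = pvP numbers.dropLast i := by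
        unfold pvP
        rw [List.dropLast_eq_take, List.take_take,
          (by omega : min (i + 1) (numbers.length - 1) = i + 1)]
        exact hpre'
      apply ih (i + 1) hdrop'
      · intro s
        rw [PySem.Dict.getD_insert]
        by_cases hsp : s = pre + x
        · rw [if_pos hsp, hL, pvCntL_succ numbers.dropLast i s hdL,
            if_pos (by rw [hsp]; exact hpfx.symm)]
          rw [hsp]
          push_cast
          ring
        · rw [if_neg hsp, hL, pvCntL_succ numbers.dropLast i s hdL,
            if_neg (fun h => hsp (by rw [← h, hpfx]))]
          simp
      · intro s
        rw [PySem.Dict.getD_modify]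
        by_cases hsp : s = pre + x
        · rw [if_pos hsp, hR, hsp, pvCntR_succ numbers.dropLast i (pre + x) hdL,
            if_pos hpfx.symm]
          push_cast
          ring
        · rw [if_neg hsp, hR, pvCntR_succ numbers.dropLast i s hdL,
            if_neg (fun h => hsp (by rw [← h, hpfx]))]
          simp
      · exact hpre'
    · -- i is the last index: the remaining list is empty
      rw [if_neg hni]
      have hni' : ¬ (i + 1 < numbers.length) := by omega
      have hrest : rest' = [] := by
        cases rest' with
        | nil => rfl
        | cons y ys =>
          simp only [List.length_cons] at hlen2
          omega
      subst hrest
      rw [PySem.List.enumerate_nil, List.foldl_nil]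
      simpa using hway

lemma pvA_eq_spec (numbers : List Int) (k : Int) :
    count_max_partitions numbers k = pvSpecRun numbers k := by
  unfold count_max_partitions pvSpecRun pvBase
  simp only [PySem.List.slice_to_neg_one]
  obtain ⟨hd, hc, -, hw⟩ := pvA1 numbers.sum numbers.dropLast
  rw [hw]
  rw [PySem.List.enumerate_eq_map_pyRange numbers 0, List.foldl_map]
  rw [PySem.List.len_eq, PySem.List.pyRange_zero_natCast, List.foldl_map]
  apply PySem.List.foldl_congr_mem
  intro acc j hj
  simp only [PySem.List.pyGetD_natCast]
  exact pvAStep2_eq numbers k _ hd hc j acc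

lemma pvB_eq_spec (numbers : List Int) (k : Int) :
    count_max_partitions_alt numbers k = pvSpecRun numbers k := by
  unfold count_max_partitions_alt pvSpecRun
  simp only [PySem.List.slice_to_neg_one]
  obtain ⟨-, hd0⟩ := pvB1 numbers.dropLast
  rw [hd0, pvBase_alt]
  have h2 := pvB2 numbers k numbers 0 (by simp) (pvBase numbers) 0 PySem.Dict.empty
    (numbers.dropLast.foldl pvBStep1 (PySem.Dict.empty, 0)).1
    (by
      intro s
      rw [PySem.Dict.getD_empty, pvCntL_zero]
      simp)
    (by
      intro s
      rw [hd0, pvCntR_zero])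
    (by simp)
  simp only [Nat.cast_zero] at h2
  rw [h2, List.range_eq_range']

-- ===== VERDICT (by name: the statement is the Claim_ definition above) =====
theorem count_max_partitions_spec : Claim_equal_count_max_partitions := by
  intro numbers k _
  unfold Spec_count_max_partitions
  rw [pvA_eq_spec, pvB_eq_spec]
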